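-- pv_equiv track=rewrite | github.com/juzi5201314/antigravity-workspace-template | engine/antigravity_engine/hub/refresh_pipeline.py | _extract_module_section
-- ===== SOURCE A (Python) =====
-- def _extract_module_section(structure_text: str, module_id: str, rel_dir: str = "") -> str:
--     """Extract lines from structure.md relevant to a module.
--
--     Matches both ``## dir/`` section headers and ``### dir/file.py`` file
--     entries whose path starts with the module's resolved directory.
--
--     Args:
--         structure_text: Full content of structure.md.
--         module_id: Module identifier (e.g. "src_tools", "frontend").
--         rel_dir: Resolved relative directory path (e.g. "src/opencmo/tools/").
--
--     Returns:
--         Extracted section text, or empty string.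
--     """
--     # Build prefixes to match
--     prefixes: list[str] = [f"{module_id}/"]
--     if rel_dir:
--         prefixes.append(rel_dir)
--         prefixes.append(rel_dir.rstrip("/"))
--     if "_" in module_id:
--         parts = module_id.split("_", 1)
--         prefixes.append(f"{parts[0]}/{parts[1]}/")
--
--     def _line_matches(line: str) -> bool:
--         # Match ## or ### headers that contain a matching path
--         stripped = line.lstrip("#").strip()
--         return any(stripped.startswith(p) or stripped.startswith(p.rstrip("/")) for p in prefixes)
--
--     lines = structure_text.splitlines()
--     result: list[str] = []
--     collecting = False
--
--     for line in lines:
--         if line.startswith("## ") or line.startswith("### "):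
--             if _line_matches(line):
--                 collecting = True
--                 result.append(line)
--                 continue
--             elif collecting and line.startswith("## "):
--                 # New top-level section that doesn't match → stop
--                 if not _line_matches(line):
--                     collecting = False
--                     continue
--         if collecting:
--             result.append(line)
--
--     return "\n".join(result[:80])  # Cap at 80 lines per module
-- ===== SOURCE B (Python) =====
-- def _extract_module_section(structure_text: str, module_id: str, rel_dir: str = "") -> str:
--     """Two-phase re-implementation: partition structure.md into top-level '## '
--     sections (plus a leading prefix chunk), then for each section emit the lines
--     from its first matching header to the section end, and flatten."""
--     prefixes = [f"{module_id}/"]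
--     if rel_dir:
--         prefixes.append(rel_dir)
--         prefixes.append(rel_dir.rstrip("/"))
--     if "_" in module_id:
--         head, tail = module_id.split("_", 1)
--         prefixes.append(f"{head}/{tail}/")
--
--     def matches(line):
--         stripped = line.lstrip("#").strip()
--         return any(stripped.startswith(p) or stripped.startswith(p.rstrip("/")) for p in prefixes)
--
--     def emitted(sec):
--         # the tail of the section from its first matching header (whole section
--         # when the section's own '## ' header matches); [] when nothing matches
--         for i, l in enumerate(sec):
--             if (l.startswith("## ") or l.startswith("### ")) and matches(l):
--                 return sec[i:]
--         return []
--
--     sections = []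
--     current = []
--     for line in structure_text.splitlines():
--         if line.startswith("## "):
--             sections.append(current)
--             current = [line]
--         else:
--             current.append(line)
--     sections.append(current)
--
--     out = [l for sec in sections for l in emitted(sec)]
--     return "\n".join(out[:80])
-- ===== Notes on version B (the rewrite author's own statement) =====
-- stated objective: alternative
-- what changed: Replaces A's single-pass boolean 'collecting' state machine over the lines by a two-phase pass: first partition the lines into top-level '## ' sections (plus a leading prefix chunk), then for each section independently emit the lines from its first matching header to the section end, and flatten before the 80-line cap.
import Mathlib
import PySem

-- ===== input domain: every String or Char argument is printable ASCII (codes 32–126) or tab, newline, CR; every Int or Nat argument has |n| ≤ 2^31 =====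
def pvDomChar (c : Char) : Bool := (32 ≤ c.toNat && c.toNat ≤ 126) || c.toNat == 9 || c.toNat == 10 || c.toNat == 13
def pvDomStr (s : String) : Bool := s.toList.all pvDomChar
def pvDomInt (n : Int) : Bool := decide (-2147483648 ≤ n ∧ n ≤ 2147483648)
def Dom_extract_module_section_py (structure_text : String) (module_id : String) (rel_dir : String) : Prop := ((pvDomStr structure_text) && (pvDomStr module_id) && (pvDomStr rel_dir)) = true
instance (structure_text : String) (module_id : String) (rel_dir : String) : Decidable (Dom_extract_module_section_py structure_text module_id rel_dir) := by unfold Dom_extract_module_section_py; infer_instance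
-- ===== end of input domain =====

-- B replaces A's single-pass collecting state machine by a two-phase pass: partition into
-- top-level '## ' sections, then per section emit from the first matching header (objective:
-- alternative decomposition, same cost).

-- ===== PORT A =====
-- shared helper code of the Python (prefix building and the _line_matches closure)
-- line.lstrip("#"): exact — drops exactly the leading '#' characters
def pvLstripHash (cs : List Char) : List Char := cs.dropWhile (fun c => c == '#')
-- s.rstrip("/"): exact — drops exactly the trailing '/' characters
def pvRstripSlash (cs : List Char) : List Char := (cs.reverse.dropWhile (fun c => c == '/')).reverse

def pvPrefixes (module_id : String) (rel_dir : String) : List (List Char) :=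
  let ps := [module_id.toList ++ ['/']]
  let ps := if rel_dir.toList ≠ [] then ps ++ [rel_dir.toList, pvRstripSlash rel_dir.toList] else ps
  if PySem.Chars.isIn ['_'] module_id.toList then
    -- module_id.split("_", 1); '_' ∈ module_id guarantees indices 0 and 1 exist (getD unreachable default)
    let parts := PySem.Chars.splitOnMax module_id.toList ['_'] 1
    ps ++ [parts.getD 0 [] ++ ['/'] ++ parts.getD 1 [] ++ ['/']]
  else ps

def pvLineMatches (ps : List (List Char)) (line : List Char) : Bool :=
  let stripped := PySem.Chars.strip (pvLstripHash line)
  ps.any (fun p => PySem.Chars.startswith stripped p || PySem.Chars.startswith stripped (pvRstripSlash p))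

def pvIsH2 (l : List Char) : Bool := PySem.Chars.startswith l ['#', '#', ' ']
def pvIsH3 (l : List Char) : Bool := PySem.Chars.startswith l ['#', '#', '#', ' ']

-- the body of A's for-loop, on state (collecting, result)
def pvStepA (ps : List (List Char)) (st : Bool × List (List Char)) (line : List Char) : Bool × List (List Char) :=
  if pvIsH2 line || pvIsH3 line then
    if pvLineMatches ps line then (true, st.2 ++ [line])
    else if st.1 && pvIsH2 line then
      if !pvLineMatches ps line then (false, st.2)
      else if st.1 then (st.1, st.2 ++ [line]) else st
    else if st.1 then (st.1, st.2 ++ [line]) else st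
  else if st.1 then (st.1, st.2 ++ [line]) else st

def extract_module_section_py (structure_text : String) (module_id : String) (rel_dir : String) : String :=
  let ps := pvPrefixes module_id rel_dir
  let lines := PySem.Chars.splitlines structure_text.toList
  let result := (lines.foldl (pvStepA ps) (false, [])).2
  String.ofList (PySem.Chars.join ['\n'] (result.take 80))

-- ===== PORT B =====
-- emitted(sec): the tail of sec from its first matching header, [] if none
def pvEmitted (ps : List (List Char)) : List (List Char) → List (List Char)
  | [] => []
  | l :: ls => if (pvIsH2 l || pvIsH3 l) && pvLineMatches ps l then l :: ls else pvEmitted ps ls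

-- the body of B's partition loop, on state (sections, current)
def pvPStep (st : List (List (List Char)) × List (List Char)) (line : List Char) : List (List (List Char)) × List (List Char) :=
  if pvIsH2 line then (st.1 ++ [st.2], [line]) else (st.1, st.2 ++ [line])

def extract_module_section_py_alt (structure_text : String) (module_id : String) (rel_dir : String) : String :=
  let ps := pvPrefixes module_id rel_dir
  let fin := (PySem.Chars.splitlines structure_text.toList).foldl pvPStep ([], [])
  let sections := fin.1 ++ [fin.2]
  let out := sections.foldl (fun acc sec => acc ++ pvEmitted ps sec) []
  String.ofList (PySem.Chars.join ['\n'] (out.take 80))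

-- ===== PRECONDITION & SPEC =====
def Spec_extract_module_section_py (structure_text : String) (module_id : String) (rel_dir : String) (out : String) : Prop := out = extract_module_section_py_alt structure_text module_id rel_dir
instance (structure_text : String) (module_id : String) (rel_dir : String) (out : String) : Decidable (Spec_extract_module_section_py structure_text module_id rel_dir out) := by unfold Spec_extract_module_section_py; infer_instance

-- ===== CLAIM (what is proved, stated in full; the proofs are below) =====
def Claim_equal_extract_module_section_py : Prop := ∀ (structure_text : String) (module_id : String) (rel_dir : String), Dom_extract_module_section_py structure_text module_id rel_dir → Spec_extract_module_section_py structure_text module_id rel_dir (extract_module_section_py structure_text module_id rel_dir)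

-- ===== LEMMAS AND PROOFS =====

-- recursive model of A's loop (proof helper)
def pvLoopA (ps : List (List Char)) : Bool → List (List Char) → List (List Char)
  | _, [] => []
  | c, l :: ls =>
    if (pvIsH2 l || pvIsH3 l) && pvLineMatches ps l then l :: pvLoopA ps true ls
    else if pvIsH2 l then pvLoopA ps false ls
    else if c then l :: pvLoopA ps c ls else pvLoopA ps c ls

-- "some header of cur matches"
def pvHasM (ps : List (List Char)) (cur : List (List Char)) : Bool :=
  cur.any (fun l => (pvIsH2 l || pvIsH3 l) && pvLineMatches ps l)

lemma pvFoldA (ps : List (List Char)) (ls : List (List Char)) :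
    ∀ c res, (ls.foldl (pvStepA ps) (c, res)).2 = res ++ pvLoopA ps c ls := by
  induction ls with
  | nil => simp [pvLoopA]
  | cons l ls ih =>
    intro c res
    simp only [List.foldl_cons, pvStepA, pvLoopA]
    by_cases hm : pvLineMatches ps l <;> by_cases h2 : pvIsH2 l <;> by_cases h3 : pvIsH3 l <;>
      cases c <;> simp [hm, h2, h3, ih]

lemma pvEmitted_nil_of_not_hasM (ps : List (List Char)) (cur : List (List Char))
    (h : pvHasM ps cur = false) : pvEmitted ps cur = [] := by
  induction cur with
  | nil => rfl
  | cons l ls ih =>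
    simp only [pvHasM, List.any_cons, Bool.or_eq_false_iff] at h
    simp [pvEmitted, h.1, ih h.2]

lemma pvEmitted_append_singleton (ps : List (List Char)) (cur : List (List Char)) (l : List Char) :
    pvEmitted ps (cur ++ [l]) =
      if pvHasM ps cur then pvEmitted ps cur ++ [l] else pvEmitted ps [l] := by
  induction cur with
  | nil => simp [pvHasM]
  | cons x xs ih =>
    by_cases hx : ((pvIsH2 x || pvIsH3 x) && pvLineMatches ps x) = true
    · simp [pvEmitted, hx, pvHasM]
    · simp only [Bool.not_eq_true] at hx
      have hxs : pvHasM ps (x :: xs) = pvHasM ps xs := by simp [pvHasM, hx]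
      simp [pvEmitted, hx, ih, hxs]

lemma pvHasM_append_singleton (ps : List (List Char)) (cur : List (List Char)) (l : List Char) :
    pvHasM ps (cur ++ [l]) = (pvHasM ps cur || ((pvIsH2 l || pvIsH3 l) && pvLineMatches ps l)) := by
  simp [pvHasM]

lemma pvMain (ps : List (List Char)) (ls : List (List Char)) :
    ∀ (secs : List (List (List Char))) (cur : List (List Char)),
      ((ls.foldl pvPStep (secs, cur)).1 ++ [(ls.foldl pvPStep (secs, cur)).2]).flatMap (pvEmitted ps)
        = secs.flatMap (pvEmitted ps) ++ pvEmitted ps cur ++ pvLoopA ps (pvHasM ps cur) ls := by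
  induction ls with
  | nil => intro secs cur; simp [pvLoopA]
  | cons l ls ih =>
    intro secs cur
    by_cases h2 : pvIsH2 l
    · have hstep : pvPStep (secs, cur) l = (secs ++ [cur], [l]) := by simp [pvPStep, h2]
      rw [List.foldl_cons, hstep, ih]
      by_cases hm : pvLineMatches ps l
      · simp [pvLoopA, pvEmitted, pvHasM, h2, hm]
      · simp [pvLoopA, pvEmitted, pvHasM, h2, hm]
    · have hstep : pvPStep (secs, cur) l = (secs, cur ++ [l]) := by simp [pvPStep, h2]
      rw [List.foldl_cons, hstep, ih, pvEmitted_append_singleton, pvHasM_append_singleton]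
      by_cases hm : ((pvIsH2 l || pvIsH3 l) && pvLineMatches ps l) = true
      · by_cases hc : pvHasM ps cur
        · simp [pvLoopA, hm, hc]
        · simp only [Bool.not_eq_true] at hc
          simp [pvLoopA, hm, hc, pvEmitted_nil_of_not_hasM ps cur hc, pvEmitted]
      · simp only [Bool.not_eq_true] at hm
        have hm3 : (pvIsH3 l && pvLineMatches ps l) = false := by simpa [h2] using hm
        by_cases hc : pvHasM ps cur
        · simp [pvLoopA, hm3, h2, hc, pvEmitted]
        · simp only [Bool.not_eq_true] at hc
          simp [pvLoopA, pvEmitted, hm3, h2, hc, pvEmitted_nil_of_not_hasM ps cur hc]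

-- ===== VERDICT (by name: the statement is the Claim_ definition above) =====
theorem extract_module_section_py_spec : Claim_equal_extract_module_section_py := by
  intro structure_text module_id rel_dir _
  unfold Spec_extract_module_section_py extract_module_section_py extract_module_section_py_alt
  simp only [PySem.List.foldl_append_eq_flatMap, pvFoldA, pvMain]
  simp [pvHasM, pvEmitted]
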